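-- pv_equiv track=rewrite | github.com/tomasvanagas/prime-research | experiments/circuit_complexity/gapl_new_intermediates.py | class_number_h
-- ===== SOURCE A (Python) =====
-- import math
--
-- def class_number_h(d):
--     """
--     Compute class number h(-d) of Q(sqrt(-d)) for fundamental discriminant -d.
--     Uses the simple formula for small d: count reduced binary quadratic forms.
--
--     A reduced form (a,b,c) with discriminant -d = b^2 - 4ac satisfies:
--     -a < b <= a < c, or 0 <= b <= a = c.
--     """
--     if d <= 0:
--         return 0
--     # Make sure d is a valid discriminant
--     D = -d
--     if d % 4 == 3:
--         D = -d  # disc = -d if d = 3 mod 4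
--     elif d % 4 == 0:
--         D = -d  # disc = -4*(d/4) ... simplified
--
--     # Count reduced forms with discriminant D = -d
--     count = 0
--     # b^2 - 4ac = -d, so 4ac = b^2 + d
--     # Need b^2 + d = 0 mod 4
--     # Reduced: |b| <= a <= c, and if |b| = a or a = c then b >= 0
--
--     max_b = int(math.isqrt(d))
--     for b in range(-max_b, max_b + 1):
--         rem = b * b + d
--         if rem % 4 != 0:
--             continue
--         ac = rem // 4
--         if ac == 0:
--             continue
--         # Find all (a, c) with a*c = ac, a >= |b|, c >= a
--         # Actually: a <= sqrt(ac) and a >= |b|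
--         for a in range(max(1, abs(b)), int(math.isqrt(ac)) + 1):
--             if ac % a == 0:
--                 c = ac // a
--                 if c >= a:
--                     # Check reduced conditions
--                     if abs(b) <= a and a <= c:
--                         if abs(b) == a or a == c:
--                             if b >= 0:
--                                 count += 1
--                         else:
--                             count += 1
--     return count
-- ===== SOURCE B (Python) =====
-- import math
--
-- def class_number_h(d):
--     """Count reduced binary quadratic forms of discriminant -d by enumerating
--     (a, b) directly and deriving c, instead of iterating b and factoring ac."""
--     if d <= 0:
--         return 0
--     count = 0
--     for a in range(1, math.isqrt(d // 3) + 1):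
--         for b in range(-a, a + 1):
--             if (b * b + d) % (4 * a) == 0:
--                 c = (b * b + d) // (4 * a)
--                 if c >= a and not ((abs(b) == a or a == c) and b < 0):
--                     count += 1
--     return count
-- ===== Notes on version B (the rewrite author's own statement) =====
-- stated objective: alternative
-- what changed: B enumerates the reduced forms directly by (a,b), with a up to isqrt(d//3), deriving c from the divisibility test, instead of A's loop over b followed by trial-factoring ac into a*c.
import Mathlib
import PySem

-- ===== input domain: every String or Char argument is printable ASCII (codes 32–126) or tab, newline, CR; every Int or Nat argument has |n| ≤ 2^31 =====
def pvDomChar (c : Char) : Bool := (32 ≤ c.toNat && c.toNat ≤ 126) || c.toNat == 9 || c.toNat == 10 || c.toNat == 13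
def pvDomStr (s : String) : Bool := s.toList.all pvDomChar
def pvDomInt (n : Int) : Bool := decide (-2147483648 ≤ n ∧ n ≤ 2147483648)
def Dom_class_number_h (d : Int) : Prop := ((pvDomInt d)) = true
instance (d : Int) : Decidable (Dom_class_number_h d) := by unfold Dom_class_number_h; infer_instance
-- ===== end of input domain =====

-- B counts the same reduced forms by enumerating (a, b) and deriving c from the
-- divisibility test, instead of A's loop over b followed by trial-factoring ac;
-- an alternative algorithm of the same cost, not faster.

-- math.isqrt, exact for a nonnegative argument (the only way either program calls it)
def pyIsqrt (n : Int) : Int := (Nat.sqrt n.toNat : Int)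

-- ===== PORT A =====
-- (A's assignments to D are dead code: D is never read; omitted.)
def class_number_h (d : Int) : Int :=
  if d ≤ 0 then 0
  else
    (PySem.List.pyRange (-(pyIsqrt d)) (pyIsqrt d + 1) 1).foldl (fun count b =>
      if PySem.Int.mod (b * b + d) 4 ≠ 0 then count
      else
        if PySem.Int.floordiv (b * b + d) 4 = 0 then count
        else
          (PySem.List.pyRange (max 1 |b|) (pyIsqrt (PySem.Int.floordiv (b * b + d) 4) + 1) 1).foldl
            (fun count a =>
              if PySem.Int.mod (PySem.Int.floordiv (b * b + d) 4) a = 0 then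
                if a ≤ PySem.Int.floordiv (PySem.Int.floordiv (b * b + d) 4) a then
                  if |b| ≤ a ∧ a ≤ PySem.Int.floordiv (PySem.Int.floordiv (b * b + d) 4) a then
                    if |b| = a ∨ a = PySem.Int.floordiv (PySem.Int.floordiv (b * b + d) 4) a then
                      if 0 ≤ b then count + 1 else count
                    else count + 1
                  else count
                else count
              else count) count) 0

-- ===== PORT B =====
def class_number_h_alt (d : Int) : Int :=
  if d ≤ 0 then 0
  else
    (PySem.List.pyRange 1 (pyIsqrt (PySem.Int.floordiv d 3) + 1) 1).foldl (fun count a =>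
      (PySem.List.pyRange (-a) (a + 1) 1).foldl (fun count b =>
        if PySem.Int.mod (b * b + d) (4 * a) = 0 then
          if a ≤ PySem.Int.floordiv (b * b + d) (4 * a) ∧
              ¬((|b| = a ∨ a = PySem.Int.floordiv (b * b + d) (4 * a)) ∧ b < 0) then count + 1
          else count
        else count) count) 0

-- ===== PRECONDITION & SPEC =====
def Spec_class_number_h (d : Int) (out : Int) : Prop := out = class_number_h_alt d
instance (d : Int) (out : Int) : Decidable (Spec_class_number_h d out) := by unfold Spec_class_number_h; infer_instance

-- ===== CLAIM (what is proved, stated in full; the proofs are below) =====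
def Claim_equal_class_number_h : Prop := ∀ (d : Int), Dom_class_number_h d → Spec_class_number_h d (class_number_h d)

-- ===== LEMMAS AND PROOFS =====
lemma le_pyIsqrt_iff {a m : Int} (ha : 0 ≤ a) (hm : 0 ≤ m) :
    a ≤ pyIsqrt m ↔ a * a ≤ m := by
  unfold pyIsqrt
  rw [show a = (a.toNat : Int) by omega]
  have := Nat.le_sqrt (m := a.toNat) (n := m.toNat)
  constructor
  · intro h
    have h2 : a.toNat * a.toNat ≤ m.toNat := this.mp (by exact_mod_cast h)
    push_cast at h2 ⊢; omega
  · intro h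
    have h2 : a.toNat * a.toNat ≤ m.toNat := by push_cast at h ⊢; omega
    exact_mod_cast this.mpr h2
lemma pyIsqrt_le_self {m : Int} (hm : 0 ≤ m) : pyIsqrt m ≤ m := by
  have := Nat.sqrt_le_self m.toNat; unfold pyIsqrt; omega
lemma pyIsqrt_nonneg (m : Int) : 0 ≤ pyIsqrt m := by unfold pyIsqrt; positivity
lemma sum_map_range_int (g : Int → Int) (lo : Int) : ∀ (n : ℕ),
    ((List.range n).map (fun k : ℕ => g (lo + (k : Int)))).sum = ∑ x ∈ Finset.Ico lo (lo + (n : Int)), g x := by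
  intro n
  induction n with
  | zero => simp
  | succ m ih =>
    rw [List.range_succ, List.map_append, List.sum_append, ih]
    have h1 : Finset.Ico lo (lo + ((m : Int) + 1)) = insert (lo + m) (Finset.Ico lo (lo + m)) := by
      rw [Finset.Ico_insert_right (by omega)]
      apply Finset.ext; intro x; simp; omega
    push_cast
    rw [h1, Finset.sum_insert (by simp)]
    simp [add_comm]
lemma sum_map_pyRange (g : Int → Int) (lo hi : Int) :
    ((PySem.List.pyRange lo hi 1).map g).sum = ∑ x ∈ Finset.Ico lo hi, g x := by
  rw [PySem.List.pyRange_one, List.map_map]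
  have h := sum_map_range_int g lo (hi - lo).toNat
  rw [show (fun k : ℕ => g (lo + (k:Int))) = g ∘ (fun k : ℕ => lo + (k:Int)) from rfl] at h
  rw [h]; congr 1; apply Finset.ext; intro x; simp; omega
def FInd (d a b : Int) : Int :=
  if 1 ≤ a ∧ |b| ≤ a ∧ (b * b + d) % (4 * a) = 0 ∧ a ≤ (b * b + d) / (4 * a) ∧
      ¬((|b| = a ∨ a = (b * b + d) / (4 * a)) ∧ b < 0) then 1 else 0
lemma FInd_support {d a b : Int} (h : FInd d a b ≠ 0) :
    1 ≤ a ∧ |b| ≤ a ∧ 3 * (a * a) ≤ d ∧ (4 * a) ∣ (b * b + d) ∧ a * a ≤ (b * b + d) / 4 := by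
  unfold FInd at h
  split_ifs at h with hc
  · obtain ⟨h1, h2, h3, h4, h5⟩ := hc
    have hdvd : (4 * a) ∣ (b * b + d) := Int.dvd_of_emod_eq_zero h3
    set c := (b * b + d) / (4 * a) with hc
    have heq : b * b + d = 4 * a * c := by rw [hc, Int.mul_ediv_cancel' hdvd]
    have hb2 : b * b ≤ a * a := by nlinarith [abs_nonneg b, sq_abs b]
    have h3a : 3 * (a * a) ≤ d := by nlinarith
    refine ⟨h1, h2, h3a, hdvd, ?_⟩
    have h44 : (b * b + d) / 4 = a * c := by
      rw [heq, show 4 * a * c = (a * c) * 4 by ring, Int.mul_ediv_cancel _ (by norm_num)]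
    rw [h44]; nlinarith
  · simp at h

lemma lemA (d b : Int) (hd : 1 ≤ d) (hb : |b| ≤ pyIsqrt d) :
    (if PySem.Int.mod (b * b + d) 4 ≠ 0 then 0
     else if PySem.Int.floordiv (b * b + d) 4 = 0 then 0
     else ((PySem.List.pyRange (max 1 |b|) (pyIsqrt (PySem.Int.floordiv (b * b + d) 4) + 1) 1).map
        (fun a =>
          if PySem.Int.mod (PySem.Int.floordiv (b * b + d) 4) a = 0 then
            if a ≤ PySem.Int.floordiv (PySem.Int.floordiv (b * b + d) 4) a then
              if |b| ≤ a ∧ a ≤ PySem.Int.floordiv (PySem.Int.floordiv (b * b + d) 4) a then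
                if |b| = a ∨ a = PySem.Int.floordiv (PySem.Int.floordiv (b * b + d) 4) a then
                  if 0 ≤ b then 1 else 0
                else 1
              else 0
            else 0
          else 0)).sum) = ∑ a ∈ Finset.Ico 1 (d + 1), FInd d a b := by
  have hb2 : b * b ≤ d := by
    have := (le_pyIsqrt_iff (abs_nonneg b) (by omega)).mp hb
    nlinarith [sq_abs b]
  have hrem : 1 ≤ b * b + d := by nlinarith
  rw [PySem.Int.mod_eq_emod_of_pos (by norm_num : (0:Int) < 4),
      PySem.Int.floordiv_eq_ediv_of_pos (by norm_num : (0:Int) < 4)]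
  by_cases h4 : (b * b + d) % 4 = 0
  case neg =>
    rw [if_pos (by exact h4)]
    symm; apply Finset.sum_eq_zero
    intro a _
    by_contra hF
    obtain ⟨h1, -, -, hdvd, -⟩ := FInd_support hF
    have : (4:Int) ∣ b * b + d := dvd_trans ⟨a, by ring⟩ hdvd
    exact h4 (Int.emod_eq_zero_of_dvd this)
  case pos =>
    rw [if_neg (by simp [h4])]
    have hdvd4 : (4:Int) ∣ b * b + d := Int.dvd_of_emod_eq_zero h4
    set ac := (b * b + d) / 4 with hac
    have hac1 : 1 ≤ ac := by omega
    have hacd : ac ≤ d := by omega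
    rw [if_neg (by omega)]
    rw [sum_map_pyRange]
    apply Finset.sum_subset_zero_on_sdiff
    · intro a ha; simp at ha ⊢
      constructor
      · omega
      · have := pyIsqrt_le_self (show (0:Int) ≤ ac by omega); omega
    · intro a ha
      simp at ha
      by_contra hF
      obtain ⟨h1, habs, -, -, hsq⟩ := FInd_support hF
      rw [← hac] at hsq
      have : a ≤ pyIsqrt ac := (le_pyIsqrt_iff (by omega) (by omega)).mpr hsq
      omega
    · intro a ha
      simp at ha
      obtain ⟨⟨hlo1, hlob⟩, hhi⟩ := ha
      have ha0 : 0 < a := by omega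
      have hmodiff : PySem.Int.mod ac a = 0 ↔ (b * b + d) % (4 * a) = 0 := by
        rw [PySem.Int.mod_eq_zero_iff_dvd]
        rw [hac, Int.dvd_div_iff_mul_dvd hdvd4]
        constructor
        · intro h; exact Int.emod_eq_zero_of_dvd h
        · intro h; exact Int.dvd_of_emod_eq_zero h
      have hceq : PySem.Int.floordiv ac a = (b * b + d) / (4 * a) := by
        rw [PySem.Int.floordiv_eq_ediv_of_pos ha0, hac, Int.ediv_ediv_of_nonneg (by norm_num)]
      have hle : a ≤ (b * b + d) / (4 * a) := by
        rw [← hceq, PySem.Int.floordiv_eq_ediv_of_pos ha0]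
        rw [Int.le_ediv_iff_mul_le ha0]
        exact (le_pyIsqrt_iff (by omega) (by omega)).mp (by omega)
      unfold FInd
      rw [hceq] at *
      obtain habs | habs := abs_choice b <;>
        (rw [habs] at *; split_ifs <;> omega)

-- inner summand of port A's a-loop
def HA (d b a : Int) : Int :=
  if PySem.Int.mod (PySem.Int.floordiv (b * b + d) 4) a = 0 then
    if a ≤ PySem.Int.floordiv (PySem.Int.floordiv (b * b + d) 4) a then
      if |b| ≤ a ∧ a ≤ PySem.Int.floordiv (PySem.Int.floordiv (b * b + d) 4) a then
        if |b| = a ∨ a = PySem.Int.floordiv (PySem.Int.floordiv (b * b + d) 4) a then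
          if 0 ≤ b then 1 else 0
        else 1
      else 0
    else 0
  else 0

-- per-b contribution of port A's outer loop
def GA (d b : Int) : Int :=
  if PySem.Int.mod (b * b + d) 4 ≠ 0 then 0
  else if PySem.Int.floordiv (b * b + d) 4 = 0 then 0
  else ((PySem.List.pyRange (max 1 |b|) (pyIsqrt (PySem.Int.floordiv (b * b + d) 4) + 1) 1).map
          (HA d b)).sum

-- inner summand of port B's b-loop
def HB (d a b : Int) : Int :=
  if PySem.Int.mod (b * b + d) (4 * a) = 0 then
    if a ≤ PySem.Int.floordiv (b * b + d) (4 * a) ∧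
        ¬((|b| = a ∨ a = PySem.Int.floordiv (b * b + d) (4 * a)) ∧ b < 0) then 1 else 0
  else 0

-- per-a contribution of port B's outer loop
def GB (d a : Int) : Int :=
  ((PySem.List.pyRange (-a) (a + 1) 1).map (HB d a)).sum

lemma foldl_add_of {l : List Int} {body : Int → Int → Int} {init : Int} (g : Int → Int)
    (h : ∀ acc x, body acc x = acc + g x) : l.foldl body init = init + (l.map g).sum := by
  have hb : body = fun acc x => acc + g x := funext fun a => funext fun x => h a x
  rw [hb, PySem.List.foldl_add]

lemma lemB (d a : Int) (hd : 1 ≤ d) (ha : 1 ≤ a) (haK : a ≤ pyIsqrt (d / 3)) :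
    GB d a = ∑ b ∈ Finset.Ico (-d) (d + 1), FInd d a b := by
  unfold GB
  rw [sum_map_pyRange]
  have had : a ≤ d := by
    have h1 : pyIsqrt (d / 3) ≤ d / 3 := pyIsqrt_le_self (by omega)
    omega
  apply Finset.sum_subset_zero_on_sdiff
  · intro b hb; simp at hb ⊢; omega
  · intro b hb
    simp at hb
    by_contra hF
    obtain ⟨-, habs, -, -, -⟩ := FInd_support hF
    have hnn := abs_nonneg b
    obtain h | h := abs_choice b <;> omega
  · intro b hb
    simp at hb
    have ha0 : (0:Int) < 4 * a := by omega
    unfold HB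
    rw [PySem.Int.mod_eq_emod_of_pos ha0, PySem.Int.floordiv_eq_ediv_of_pos ha0]
    unfold FInd
    obtain habs | habs := abs_choice b <;> (rw [habs] at *; split_ifs <;> omega)

lemma portA_eq (d : Int) (hd : 1 ≤ d) :
    class_number_h d = ∑ a ∈ Finset.Ico 1 (d + 1), ∑ b ∈ Finset.Ico (-d) (d + 1), FInd d a b := by
  unfold class_number_h
  rw [if_neg (by omega)]
  rw [foldl_add_of (GA d) (fun count b => by
    unfold GA
    by_cases h1 : PySem.Int.mod (b * b + d) 4 ≠ 0
    · rw [if_pos h1, if_pos h1]; try omega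
    · rw [if_neg h1, if_neg h1]
      by_cases h2 : PySem.Int.floordiv (b * b + d) 4 = 0
      · rw [if_pos h2, if_pos h2]; try omega
      · rw [if_neg h2, if_neg h2]
        rw [foldl_add_of (HA d b) (fun acc x => by unfold HA; split_ifs <;> omega)])]
  rw [zero_add, sum_map_pyRange]
  have hstep : ∀ b ∈ Finset.Ico (-(pyIsqrt d)) (pyIsqrt d + 1),
      GA d b = ∑ a ∈ Finset.Ico 1 (d + 1), FInd d a b := by
    intro b hb
    simp at hb
    have habs : |b| ≤ pyIsqrt d := by obtain h | h := abs_choice b <;> omega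
    exact lemA d b hd habs
  rw [Finset.sum_congr rfl hstep]
  have hext : ∑ b ∈ Finset.Ico (-(pyIsqrt d)) (pyIsqrt d + 1), ∑ a ∈ Finset.Ico 1 (d + 1), FInd d a b
      = ∑ b ∈ Finset.Ico (-d) (d + 1), ∑ a ∈ Finset.Ico 1 (d + 1), FInd d a b := by
    apply Finset.sum_subset_zero_on_sdiff
    · intro b hb
      have h1 := pyIsqrt_le_self (show (0:Int) ≤ d by omega)
      have h2 := pyIsqrt_nonneg d
      simp at hb ⊢; omega
    · intro b hb
      simp at hb
      apply Finset.sum_eq_zero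
      intro a ha
      by_contra hF
      obtain ⟨h1, habs, h3, -, -⟩ := FInd_support hF
      have hnn := abs_nonneg b
      have hbb : |b| ≤ pyIsqrt d :=
        (le_pyIsqrt_iff (abs_nonneg b) (by omega)).mpr (by nlinarith [sq_abs b])
      obtain h | h := abs_choice b <;> omega
    · intro b hb; rfl
  rw [hext, Finset.sum_comm]

lemma portB_eq (d : Int) (hd : 1 ≤ d) :
    class_number_h_alt d = ∑ a ∈ Finset.Ico 1 (d + 1), ∑ b ∈ Finset.Ico (-d) (d + 1), FInd d a b := by
  unfold class_number_h_alt
  rw [if_neg (by omega)]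
  rw [foldl_add_of (GB d) (fun count a => by
    unfold GB
    rw [foldl_add_of (HB d a) (fun acc b => by unfold HB; split_ifs <;> omega)])]
  rw [zero_add, sum_map_pyRange,
      show PySem.Int.floordiv d 3 = d / 3 from PySem.Int.floordiv_eq_ediv_of_pos (by norm_num)]
  have hstep : ∀ a ∈ Finset.Ico 1 (pyIsqrt (d / 3) + 1),
      GB d a = ∑ b ∈ Finset.Ico (-d) (d + 1), FInd d a b := by
    intro a ha
    simp at ha
    exact lemB d a hd (by omega) (by omega)
  rw [Finset.sum_congr rfl hstep]
  apply Finset.sum_subset_zero_on_sdiff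
  · intro a ha
    have h1 : pyIsqrt (d / 3) ≤ d / 3 := pyIsqrt_le_self (by omega)
    simp at ha ⊢; omega
  · intro a ha
    simp at ha
    apply Finset.sum_eq_zero
    intro b hb
    by_contra hF
    obtain ⟨h1, -, h3, -, -⟩ := FInd_support hF
    have : a ≤ pyIsqrt (d / 3) :=
      (le_pyIsqrt_iff (by omega) (by omega)).mpr (by omega)
    omega
  · intro a ha; rfl

-- ===== VERDICT (by name: the statement is the Claim_ definition above) =====
theorem class_number_h_spec : Claim_equal_class_number_h := by
  intro d _
  unfold Spec_class_number_h
  by_cases hd : d ≤ 0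
  · simp [class_number_h, class_number_h_alt, hd]
  · rw [portA_eq d (by omega), portB_eq d (by omega)]
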